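-- pv_equiv track=rewrite | github.com/mmccthomas/Pythonista_games | Word_Games/Letter_game.py | predict_direction
-- ===== SOURCE A (Python) =====
-- def add(a,b):
--   """ helper function to add 2 tuples """
--   return tuple(p+q for p, q in zip(a, b))
--
-- def sub(a,b):
--   """ helper function to subtract 2 tuples """
--   return tuple(p-q for p, q in zip(a, b))
--
-- def predict_direction(move):
--     ''' take a asequence of coordinates and predict direction (N, S,E,W etc)'''
--     def sign(x):
--       return (x > 0) - (x < 0)
--
--     def uniquify(moves):
--       """ filters list into unique elements retaining order"""
--       return list(dict.fromkeys(moves))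
--
--     move = uniquify(move)
--     start = move[0]
--     st_r, st_c = start
--     end = move[-1]
--     diff = sub(end, start)
--     deltay, deltax = diff
--
--     dx = sign(deltax)
--     dy = sign(deltay)
--     # interpolate between start and end points
--     if dx == 0 and dy == 0:
--       rc_s = []
--     elif dx == 0:
--       rc_s = [add(start, (c*dy, 0)) for c in range(abs(deltay)+1)]
--     elif dy == 0:
--       rc_s = [add(start, (0, c*dx)) for c in range(abs(deltax)+1)]
--     else:
--       rc_s = [add(start, (c*dy, c*dx))  for  c in range(abs(deltax)+1)]
--     return rc_s
-- ===== SOURCE B (Python) =====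
-- def predict_direction(move):
--     ''' take a asequence of coordinates and predict direction (N, S,E,W etc)'''
--     move = list(dict.fromkeys(move))
--     start = move[0]
--     end = move[-1]
--     deltay = end[0] - start[0]
--     deltax = end[1] - start[1]
--     dy = (deltay > 0) - (deltay < 0)
--     dx = (deltax > 0) - (deltax < 0)
--     if dx == 0 and dy == 0:
--         return []
--     n = abs(deltay) if dx == 0 else abs(deltax)
--     out = []
--     cur = start
--     for _ in range(n + 1):
--         out.append(cur)
--         cur = (cur[0] + dy, cur[1] + dx)
--     return out
-- ===== Notes on version B (the rewrite author's own statement) =====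
-- stated objective: simpler
-- what changed: Replaces the four-way branch of per-index range comprehensions (c*dy, c*dx offsets added to start) by a single incremental walk that threads a running point cur through one loop, stepping by (dy, dx) each iteration; the step count is abs(deltay) when dx==0, else abs(deltax), collapsing A's branches into one.
import Mathlib
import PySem

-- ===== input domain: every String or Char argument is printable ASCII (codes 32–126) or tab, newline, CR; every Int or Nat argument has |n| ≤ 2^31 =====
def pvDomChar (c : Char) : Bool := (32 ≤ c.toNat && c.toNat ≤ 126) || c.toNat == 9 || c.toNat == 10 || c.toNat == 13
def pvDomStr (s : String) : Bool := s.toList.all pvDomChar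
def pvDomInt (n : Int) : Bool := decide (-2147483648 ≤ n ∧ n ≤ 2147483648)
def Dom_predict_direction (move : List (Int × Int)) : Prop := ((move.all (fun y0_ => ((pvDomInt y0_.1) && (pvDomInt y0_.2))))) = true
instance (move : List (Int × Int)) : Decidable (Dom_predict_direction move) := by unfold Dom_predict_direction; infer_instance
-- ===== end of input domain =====

-- B replaces A's four-way branch of range comprehensions by a single incremental walk
-- threading a running point (objective: simpler decomposition, same cost).


-- ===== PORT A =====
-- sign(x) = (x > 0) - (x < 0)
def pdSign (x : Int) : Int := (if x > 0 then 1 else 0) - (if x < 0 then 1 else 0)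

def predict_direction (move : List (Int × Int)) : List (Int × Int) :=
  let m := PySem.List.dedup move          -- uniquify = list(dict.fromkeys(moves))
  match PySem.List.pyGet? m 0, PySem.List.pyGet? m (-1) with
  | some start, some ed =>
      let deltay := ed.1 - start.1
      let deltax := ed.2 - start.2
      let dx := pdSign deltax
      let dy := pdSign deltay
      if dx = 0 ∧ dy = 0 then []
      else if dx = 0 then
        (PySem.List.pyRange 0 (|deltay| + 1) 1).map (fun c => (start.1 + c * dy, start.2 + 0))
      else if dy = 0 then
        (PySem.List.pyRange 0 (|deltax| + 1) 1).map (fun c => (start.1 + 0, start.2 + c * dx))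
      else
        (PySem.List.pyRange 0 (|deltax| + 1) 1).map (fun c => (start.1 + c * dy, start.2 + c * dx))
  | _, _ => []                            -- move[0] / move[-1] raises IndexError (excluded by Pre_)

-- ===== PORT B =====
-- the incremental walk: n+1 iterations of 'append cur; cur += (dy, dx)'
def pdWalk : Nat → (Int × Int) → Int → Int → List (Int × Int)
  | 0, _, _, _ => []
  | Nat.succ k, cur, dy, dx => cur :: pdWalk k (cur.1 + dy, cur.2 + dx) dy dx

def predict_direction_alt (move : List (Int × Int)) : List (Int × Int) :=
  let m := PySem.List.dedup move
  match PySem.List.pyGet? m 0 with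
  | none => []                            -- move[0] raises IndexError (excluded by Pre_)
  | some start =>
    match PySem.List.pyGet? m (-1) with
    | none => []
    | some ed =>
      let deltay := ed.1 - start.1
      let deltax := ed.2 - start.2
      let dy := (if deltay > 0 then (1 : Int) else 0) - (if deltay < 0 then 1 else 0)
      let dx := (if deltax > 0 then (1 : Int) else 0) - (if deltax < 0 then 1 else 0)
      if dx = 0 ∧ dy = 0 then []
      else
        let n := if dx = 0 then |deltay| else |deltax|
        pdWalk (n.toNat + 1) start dy dx

-- ===== PRECONDITION & SPEC =====
-- Python A raises IndexError (move[0]) on the empty list; it returns on every nonempty list.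
def Pre_predict_direction (move : List (Int × Int)) : Prop := move ≠ []
instance (move : List (Int × Int)) : Decidable (Pre_predict_direction move) := by unfold Pre_predict_direction; infer_instance
def pvWitness_predict_direction : (List (Int × Int)) := [((0 : Int), (2 : Int)), ((1 : Int), (1 : Int))]

def Spec_predict_direction (move : List (Int × Int)) (out : List (Int × Int)) : Prop := out = predict_direction_alt move
instance (move : List (Int × Int)) (out : List (Int × Int)) : Decidable (Spec_predict_direction move out) := by unfold Spec_predict_direction; infer_instance

-- ===== CLAIM (what is proved, stated in full; the proofs are below) =====
def Claim_equal_predict_direction : Prop := ∀ (move : List (Int × Int)), Dom_predict_direction move → Pre_predict_direction move → Spec_predict_direction move (predict_direction move)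

-- ===== LEMMAS AND PROOFS =====

-- the walk unrolls to the closed offsets c*dy, c*dx from the start point
lemma pdWalk_eq_map (n : Nat) (s : Int × Int) (dy dx : Int) :
    pdWalk n s dy dx = (List.range n).map (fun k : Nat => ((s.1 + (k : Int) * dy, s.2 + (k : Int) * dx) : Int × Int)) := by
  induction n generalizing s with
  | zero => rfl
  | succ k ih =>
      rw [List.range_succ_eq_map, List.map_cons, List.map_map]
      show (s :: pdWalk k (s.1 + dy, s.2 + dx) dy dx) = _
      rw [ih]
      refine congrArg₂ _ (by simp) (List.map_congr_left ?_)
      intro a _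
      simp only [Function.comp_apply, Prod.mk.injEq]
      constructor <;> push_cast <;> ring

lemma pyRange_abs_succ (d : Int) :
    PySem.List.pyRange 0 (|d| + 1) 1 = (List.range (d.natAbs + 1)).map (fun k : Nat => ((k : Int))) := by
  rw [PySem.List.pyRange_one]
  have h : (|d| + 1 - 0).toNat = d.natAbs + 1 := by rw [Int.abs_eq_natAbs]; omega
  rw [h]
  exact List.map_congr_left (fun a _ => by simp)

lemma pd_toNat_abs (d : Int) : |d|.toNat = d.natAbs := by
  rw [Int.abs_eq_natAbs]; exact Int.toNat_natCast _

-- the four-way branch of A equals the single walk of B, for any start point and deltas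
lemma pd_branches_eq (s : Int × Int) (dY dX : Int) :
    (if pdSign dX = 0 ∧ pdSign dY = 0 then ([] : List (Int × Int))
     else if pdSign dX = 0 then
       (PySem.List.pyRange 0 (|dY| + 1) 1).map (fun c => (s.1 + c * pdSign dY, s.2 + 0))
     else if pdSign dY = 0 then
       (PySem.List.pyRange 0 (|dX| + 1) 1).map (fun c => (s.1 + 0, s.2 + c * pdSign dX))
     else
       (PySem.List.pyRange 0 (|dX| + 1) 1).map (fun c => (s.1 + c * pdSign dY, s.2 + c * pdSign dX))) =
    (if pdSign dX = 0 ∧ pdSign dY = 0 then []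
     else pdWalk ((if pdSign dX = 0 then |dY| else |dX|).toNat + 1) s (pdSign dY) (pdSign dX)) := by
  by_cases h0 : pdSign dX = 0 ∧ pdSign dY = 0
  · simp only [if_pos h0]
  · simp only [if_neg h0]
    by_cases hx : pdSign dX = 0
    · simp only [if_pos hx, pdWalk_eq_map, pyRange_abs_succ, List.map_map, pd_toNat_abs]
      refine List.map_congr_left fun a _ => ?_
      simp [hx]
    · simp only [if_neg hx, pdWalk_eq_map, pyRange_abs_succ, List.map_map, pd_toNat_abs]
      by_cases hy : pdSign dY = 0
      · simp only [if_pos hy]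
        refine List.map_congr_left fun a _ => ?_
        simp [hy]
      · simp only [if_neg hy]
        rfl

-- ===== VERDICT (by name: the statement is the Claim_ definition above) =====
theorem predict_direction_spec : Claim_equal_predict_direction := by
  intro move _ _
  unfold Spec_predict_direction predict_direction predict_direction_alt
  cases hg0 : PySem.List.pyGet? (PySem.List.dedup move) 0 with
  | none => simp only [hg0]
  | some start =>
    cases hg1 : PySem.List.pyGet? (PySem.List.dedup move) (-1) with
    | none => simp only [hg0, hg1]
    | some ed =>
      simp only [hg0, hg1]
      exact pd_branches_eq start (ed.1 - start.1) (ed.2 - start.2)
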